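-- pv_equiv track=rewrite | github.com/xd2333/GalTransl | GalTransl/Utils.py | find_most_repeated_substring
-- ===== SOURCE A (Python) =====
-- def find_most_repeated_substring(text):
--     max_count = 0
--     max_substring = ""
--     n = len(text)
--
--     for i in range(n):
--         for j in range(i + 1, n + 1):
--             substring = text[i:j]
--             count = 1
--             start = j
--             while start + len(substring) <= n and text[start:start + len(substring)] == substring:
--                 count += 1
--                 start += len(substring)
--
--             if count > max_count or (count == max_count and len(substring) > len(max_substring)):
--                 max_count = count
--                 max_substring = substring
--
--     return max_substring, max_count
-- ===== SOURCE B (Python) =====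
-- def find_most_repeated_substring(text):
--     n = len(text)
--     # lcp[i][k] = length of the longest common prefix of text[i:] and text[k:],
--     # built bottom-up: lcp[i][k] = lcp[i+1][k+1] + 1 when text[i] == text[k].
--     row = [0] * (n + 1)          # row for i = n
--     lcp = [row]                  # lcp stored in reverse: lcp[n - i] is row i
--     for i in range(n - 1, -1, -1):
--         prev = lcp[-1]
--         row = [0] * (n + 1)
--         for k in range(n):
--             if text[i] == text[k]:
--                 row[k] = prev[k + 1] + 1
--         lcp.append(row)
--     max_count = 0
--     max_len = 0
--     max_substring = ""
--     for i in range(n):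
--         ri = lcp[n - i]
--         for j in range(i + 1, n + 1):
--             count = 1 + ri[j] // (j - i)
--             if count > max_count or (count == max_count and j - i > max_len):
--                 max_count = count
--                 max_len = j - i
--                 max_substring = text[i:j]
--     return max_substring, max_count
-- ===== Notes on version B (the rewrite author's own statement) =====
-- stated objective: faster
-- what changed: B precomputes an O(n^2) longest-common-prefix table bottom-up and reads each repetition count as 1 + lcp(i,j)//(j-i), instead of A's per-pair slicing and repeated slice-comparison rescan.
import Mathlib
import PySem

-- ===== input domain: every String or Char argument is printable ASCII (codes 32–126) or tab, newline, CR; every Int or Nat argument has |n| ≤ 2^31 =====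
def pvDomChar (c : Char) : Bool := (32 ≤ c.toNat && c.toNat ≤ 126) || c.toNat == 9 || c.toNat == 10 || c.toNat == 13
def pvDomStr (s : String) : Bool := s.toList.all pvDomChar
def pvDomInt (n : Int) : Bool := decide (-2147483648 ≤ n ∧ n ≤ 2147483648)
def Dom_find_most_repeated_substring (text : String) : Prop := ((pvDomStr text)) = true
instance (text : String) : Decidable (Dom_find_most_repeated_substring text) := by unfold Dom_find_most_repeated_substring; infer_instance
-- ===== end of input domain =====

-- B replaces A's per-pair slice-and-rescan repetition count by a precomputed O(n^2) longest-common-prefix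
-- table (count(i,j) = 1 + lcp(i,j) // (j-i)), keeping A's exact pair order and tie-breaking.

-- ===== PORT A =====
-- the inner `while` of A: counts repetitions of `s` at start, start+|s|, …
-- (the `1 ≤ s.length` guard only makes the recursion total; every call site has a nonempty s)
def pvA_countLoop (t : List Char) (s : List Char) (start : Nat) (count : Int) : Int :=
  if h : 1 ≤ s.length ∧ start + s.length ≤ t.length ∧
      PySem.List.slice t (some (start : Int)) (some ((start : Int) + (s.length : Int))) = s then
    pvA_countLoop t s (start + s.length) (count + 1)
  else count
termination_by t.length - start
decreasing_by omega

def pvA_inner (t : List Char) (i : Nat) (acc : Int × List Char) (j : Nat) : Int × List Char :=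
  let substring := PySem.List.slice t (some (i : Int)) (some (j : Int))
  let count := pvA_countLoop t substring j 1
  if count > acc.1 ∨ (count = acc.1 ∧ substring.length > acc.2.length) then (count, substring) else acc

def find_most_repeated_substring (text : String) : String × Int :=
  let t := text.toList
  let n := t.length
  let r := (List.range n).foldl
    (fun acc i => (List.range' (i + 1) (n - i)).foldl (pvA_inner t i) acc) (0, [])
  (String.ofList r.2, r.1)

-- ===== PORT B =====
-- row i of the lcp table: row[k] = prev[k+1] + 1 when text[i] == text[k] (prev = row i+1)
def pvB_row (t : List Char) (n i : Nat) (prev : List Nat) : List Nat :=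
  (List.range n).foldl
    (fun row k => if t.getD i ' ' = t.getD k ' ' then row.set k (prev.getD (k + 1) 0 + 1) else row)
    (List.replicate (n + 1) 0)

-- the table, built bottom-up; stored reversed (entry n-i is row i), as in Source B
def pvB_table (t : List Char) (n : Nat) : List (List Nat) :=
  ((List.range n).reverse).foldl
    (fun lcp i => lcp ++ [pvB_row t n i (lcp.getD (lcp.length - 1) [])])
    [List.replicate (n + 1) 0]

def pvB_inner (t : List Char) (ri : List Nat) (i : Nat) (acc : Int × Nat × List Char) (j : Nat) :
    Int × Nat × List Char :=
  let count : Int := 1 + ((ri.getD j 0 / (j - i) : Nat) : Int)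
  if count > acc.1 ∨ (count = acc.1 ∧ j - i > acc.2.1) then
    (count, j - i, PySem.List.slice t (some (i : Int)) (some (j : Int)))
  else acc

def find_most_repeated_substring_alt (text : String) : String × Int :=
  let t := text.toList
  let n := t.length
  let table := pvB_table t n
  let r := (List.range n).foldl
    (fun acc i => (List.range' (i + 1) (n - i)).foldl (pvB_inner t (table.getD (n - i) []) i) acc)
    (0, 0, [])
  (String.ofList r.2.2, r.1)

-- ===== PRECONDITION & SPEC =====
def Spec_find_most_repeated_substring (text : String) (out : String × Int) : Prop := out = find_most_repeated_substring_alt text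
instance (text : String) (out : String × Int) : Decidable (Spec_find_most_repeated_substring text out) := by unfold Spec_find_most_repeated_substring; infer_instance

-- ===== CLAIM (what is proved, stated in full; the proofs are below) =====
def Claim_equal_find_most_repeated_substring : Prop := ∀ (text : String), Dom_find_most_repeated_substring text → Spec_find_most_repeated_substring text (find_most_repeated_substring text)

-- ===== LEMMAS AND PROOFS =====

def clcp (t : List Char) (i k : Nat) : Nat :=
  if h : i < t.length ∧ k < t.length ∧ t.getD i ' ' = t.getD k ' ' then clcp t (i + 1) (k + 1) + 1
  else 0
termination_by t.length - i
decreasing_by omega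

theorem clcp_ge_iff (t : List Char) (m : Nat) : ∀ (i k : Nat),
    (m ≤ clcp t i k ↔ ∀ x < m, i + x < t.length ∧ k + x < t.length ∧
      t.getD (i + x) ' ' = t.getD (k + x) ' ') := by
  induction m with
  | zero => intro i k; simp
  | succ m ih =>
    intro i k
    rw [clcp]
    split_ifs with h
    · constructor
      · intro hm x hx
        rcases Nat.eq_zero_or_pos x with rfl | hpos
        · simpa using ⟨h.1, h.2.1, h.2.2⟩
        · obtain ⟨x, rfl⟩ := Nat.exists_eq_add_of_le hpos
          have := ((ih (i+1) (k+1)).mp (by omega)) x (by omega)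
          constructor; · omega
          constructor; · omega
          have e1 : i + (Nat.succ 0 + x) = i + 1 + x := by omega
          have e2 : k + (Nat.succ 0 + x) = k + 1 + x := by omega
          rw [e1, e2]; exact this.2.2
      · intro hall
        have : m ≤ clcp t (i+1) (k+1) := by
          rw [ih]
          intro x hx
          have := hall (x+1) (by omega)
          refine ⟨by omega, by omega, ?_⟩
          have e1 : i + (x + 1) = i + 1 + x := by omega
          have e2 : k + (x + 1) = k + 1 + x := by omega
          rw [← e1, ← e2]; exact this.2.2
        omega
    · constructor
      · omega
      · intro hall
        exfalso
        have := hall 0 (by omega)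
        simp at this
        exact h ⟨this.1, this.2.1, this.2.2⟩

theorem clcp_chain (t : List Char) (i L G : Nat) (hL : 1 ≤ L)
    (Hper : ∀ y < G, t.getD (i + y) ' ' = t.getD (i + L + y) ' ') :
    ∀ m r, r + m * L < G + L → t.getD (i + r) ' ' = t.getD (i + r + m * L) ' ' := by
  intro m
  induction m with
  | zero => intro r _; simp
  | succ m ih =>
    intro r hr
    have h1 : t.getD (i + r) ' ' = t.getD (i + r + m * L) ' ' := ih r (by nlinarith)
    have h2 := Hper (r + m * L) (by nlinarith)
    rw [h1]
    have e1 : i + r + (m + 1) * L = i + L + (r + m * L) := by ring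
    have e0 : i + r + m * L = i + (r + m * L) := by ring
    rw [e1, e0]; exact h2

def pvBlk (t : List Char) (i j L m : Nat) : Prop :=
  ∀ x < L, i + x < t.length ∧ j + m * L + x < t.length ∧
    t.getD (j + m * L + x) ' ' = t.getD (i + x) ' '

theorem blocks_iff (t : List Char) (i j : Nat) (hij : i < j) (hjn : j ≤ t.length) :
    ∀ c : Nat, (∀ m < c, pvBlk t i j (j - i) m) ↔ c * (j - i) ≤ clcp t i j := by
  intro c
  set L := j - i with hLdef
  have hL : 1 ≤ L := by omega
  have hj : j = i + L := by omega
  constructor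
  · intro hblk
    rw [clcp_ge_iff]
    intro y hy
    have hc1 : 1 ≤ c := by nlinarith
    have hm : y / L < c := (Nat.div_lt_iff_lt_mul (by omega : 0 < L)).mpr hy
    have hx : y % L < L := Nat.mod_lt _ (by omega)
    have hy' : y = y / L * L + y % L := by
      have h := Nat.div_add_mod y L
      rw [Nat.mul_comm] at h; omega
    set m := y / L with hmdef
    set x := y % L with hxdef
    have hbm := hblk m hm x hx
    have hjy : j + y = j + m * L + x := by omega
    refine ⟨by omega, by omega, ?_⟩
    rw [hjy]
    rcases Nat.eq_zero_or_pos m with hm0 | hmpos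
    · have : i + y = i + x := by simp [hm0] at hy' ⊢; omega
      rw [this, hbm.2.2]
    · have hbm' := hblk (m - 1) (by omega) x hx
      have e : i + y = j + (m - 1) * L + x := by
        have : (m - 1) * L + L = m * L := by
          have : m - 1 + 1 = m := by omega
          calc (m-1) * L + L = (m - 1 + 1) * L := by ring
          _ = m * L := by rw [this]
        omega
      rw [e, hbm'.2.2, hbm.2.2]
  · intro hg m hm x hx
    have hpt := (clcp_ge_iff t (c * L) i j).mp hg
    have hyx : m * L + x < c * L := by nlinarith
    have h1 := hpt (m * L + x) hyx
    have Hper : ∀ y < c * L, t.getD (i + y) ' ' = t.getD (i + L + y) ' ' := by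
      intro y hy
      have := (hpt y hy).2.2
      rw [this, hj]
    have hch := clcp_chain t i L (c * L) hL Hper (m + 1) x (by nlinarith)
    refine ⟨by omega, by omega, ?_⟩
    have e1 : j + m * L + x = i + x + (m + 1) * L := by
      rw [hj]; ring
    rw [e1, ← hch]

theorem take_drop_eq_iff (t : List Char) (a i L : Nat) (ha : a + L ≤ t.length)
    (hi : i + L ≤ t.length) :
    (t.drop a).take L = (t.drop i).take L ↔
      ∀ x < L, t.getD (a + x) ' ' = t.getD (i + x) ' ' := by
  constructor
  · intro he x hx
    have h1 : ((t.drop a).take L)[x]'(by simp; omega) = ((t.drop i).take L)[x]'(by simp; omega) := by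
      simp [he]
    simp [List.getElem_take, List.getElem_drop] at h1
    rw [List.getD_eq_getElem _ _ (by omega), List.getD_eq_getElem _ _ (by omega)]
    convert h1 using 2
  · intro hpt
    apply List.ext_getElem
    · simp; omega
    · intro x hx1 hx2
      simp only [List.getElem_take, List.getElem_drop]
      have hxL : x < L := by simp at hx1; omega
      have := hpt x hxL
      rw [List.getD_eq_getElem _ _ (by omega), List.getD_eq_getElem _ _ (by omega)] at this
      convert this using 2

theorem loopA (t : List Char) (i j : Nat) (hij : i < j) (hjn : j ≤ t.length) :
    ∀ d k : Nat, ∀ c : Int, clcp t i j / (j - i) - k = d → k ≤ clcp t i j / (j - i) →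
      pvA_countLoop t ((t.drop i).take (j - i)) (j + k * (j - i)) c
        = c + ((clcp t i j / (j - i) - k : Nat) : Int) := by
  set L := j - i with hLdef
  have hL : 1 ≤ L := by omega
  set g := clcp t i j with hgdef
  have hslen : ((t.drop i).take L).length = L := by simp; omega
  have hcond : ∀ k : Nat,
      (1 ≤ ((t.drop i).take L).length ∧ j + k * L + ((t.drop i).take L).length ≤ t.length ∧
        PySem.List.slice t (some ((j + k * L : Nat) : Int))
          (some (((j + k * L : Nat) : Int) + ((((t.drop i).take L).length : Nat) : Int)))
          = (t.drop i).take L)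
      ↔ pvBlk t i j L k := by
    intro k
    rw [hslen]
    have hcast : ((j + k * L : Nat) : Int) + ((L : Nat) : Int) = ((j + k * L + L : Nat) : Int) := by
      push_cast; ring
    rw [hcast, PySem.List.slice_natCast]
    have harg : j + k * L + L - (j + k * L) = L := by omega
    rw [harg]
    constructor
    · rintro ⟨-, h2, h3⟩
      intro x hx
      refine ⟨by omega, by omega, ?_⟩
      exact (take_drop_eq_iff t (j + k * L) i L (by omega) (by omega)).mp h3 x hx
    · intro hB
      have h2 : j + k * L + L ≤ t.length := by
        have := hB (L - 1) (by omega)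
        omega
      refine ⟨by omega, h2, ?_⟩
      rw [take_drop_eq_iff t (j + k * L) i L (by omega) (by omega)]
      intro x hx
      exact (hB x hx).2.2
  intro d
  induction d with
  | zero =>
    intro k c hd hk
    rw [pvA_countLoop]
    rw [dif_neg]
    · simp [hd]
    · rw [hcond k]
      intro hB
      have hall : ∀ m < k + 1, pvBlk t i j L m := by
        intro m hm
        rcases Nat.lt_or_ge m k with h | h
        · exact ((blocks_iff t i j hij hjn k).mpr ((Nat.le_div_iff_mul_le (by omega)).mp hk)) m h
        · have : m = k := by omega
          rw [this]; exact hB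
      have := (blocks_iff t i j hij hjn (k + 1)).mp hall
      have : k + 1 ≤ g / L := (Nat.le_div_iff_mul_le (by omega)).mpr this
      omega
  | succ d ih =>
    intro k c hd hk
    rw [pvA_countLoop]
    rw [dif_pos]
    · rw [hslen]
      have harg : j + k * L + L = j + (k + 1) * L := by ring
      rw [harg]
      have := ih (k + 1) (c + 1) (by omega) (by omega)
      rw [this]
      have e : ((g / L - k : Nat) : Int) = ((g / L - (k + 1) : Nat) : Int) + 1 := by
        have : k + 1 ≤ g / L := by omega
        push_cast [Nat.cast_sub hk, Nat.cast_sub this]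
        ring
      rw [e]; ring
    · rw [hcond k]
      have hk1 : (k + 1) * L ≤ g := (Nat.le_div_iff_mul_le (by omega)).mp (by omega)
      exact ((blocks_iff t i j hij hjn (k + 1)).mpr hk1) k (by omega)

theorem countLoop_eq (t : List Char) (i j : Nat) (hij : i < j) (hjn : j ≤ t.length) :
    pvA_countLoop t (PySem.List.slice t (some (i : Int)) (some (j : Int))) j 1
      = 1 + ((clcp t i j / (j - i) : Nat) : Int) := by
  rw [PySem.List.slice_natCast]
  have := loopA t i j hij hjn (clcp t i j / (j - i)) 0 1 (Nat.sub_zero _) (Nat.zero_le _)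
  simpa using this

def rfRow (t : List Char) (n : Nat) : Nat → List Nat
  | 0 => List.replicate (n + 1) 0
  | d + 1 => pvB_row t n (n - 1 - d) (rfRow t n d)

theorem row_spec (t : List Char) (n i : Nat) (prev : List Nat) :
    ∀ j ≤ n, (pvB_row t n i prev).getD j 0 =
      if j < n ∧ t.getD i ' ' = t.getD j ' ' then prev.getD (j + 1) 0 + 1 else 0 := by
  unfold pvB_row
  suffices h : ∀ m ≤ n, ∀ j ≤ n, (((List.range m).foldl (fun row k => if t.getD i ' ' = t.getD k ' '
      then row.set k (prev.getD (k + 1) 0 + 1) else row) (List.replicate (n + 1) 0)).getD j 0) =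
      if j < m ∧ t.getD i ' ' = t.getD j ' ' then prev.getD (j + 1) 0 + 1 else 0 by
    intro j hj; exact h n (le_refl n) j hj
  intro m
  induction m with
  | zero =>
    intro _ j hj
    simp [List.getD_eq_getElem?_getD]
  | succ m ih =>
    intro hm j hj
    rw [List.range_succ, List.foldl_append]
    simp only [List.foldl_cons, List.foldl_nil]
    have hlen : ((List.range m).foldl (fun row k => if t.getD i ' ' = t.getD k ' '
        then row.set k (prev.getD (k + 1) 0 + 1) else row) (List.replicate (n + 1) 0)).length = n + 1 := by
      have : ∀ (l : List Nat) (r : List Nat),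
          (l.foldl (fun row k => if t.getD i ' ' = t.getD k ' '
            then row.set k (prev.getD (k + 1) 0 + 1) else row) r).length = r.length := by
        intro l
        induction l with
        | nil => intro r; rfl
        | cons a l ih2 =>
          intro r
          simp only [List.foldl_cons]
          rw [ih2]
          split_ifs <;> simp
      rw [this]; simp
    by_cases hc : t.getD i ' ' = t.getD m ' '
    · rw [if_pos hc]
      by_cases hne : j = m
      · subst hne
        rw [List.getD_eq_getElem _ _ (by rw [List.length_set, hlen]; omega)]
        rw [List.getElem_set_self (by rw [List.length_set, hlen]; omega)]
        rw [if_pos ⟨by omega, hc⟩]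
      · rw [List.getD_eq_getElem _ _ (by rw [List.length_set, hlen]; omega),
            List.getElem_set_ne (by omega) (by rw [List.length_set, hlen]; omega),
            ← List.getD_eq_getElem _ 0 (by rw [hlen]; omega),
            ih (by omega) j hj]
        have hiff : (j < m + 1 ∧ t.getD i ' ' = t.getD j ' ') ↔ (j < m ∧ t.getD i ' ' = t.getD j ' ') := by
          constructor <;> (rintro ⟨h1, h2⟩; exact ⟨by omega, h2⟩)
        rw [if_congr hiff rfl rfl]
    · rw [if_neg hc, ih (by omega) j hj]
      by_cases hne : j = m
      · have hfalse : ¬(t.getD i ' ' = t.getD j ' ') := by rw [hne]; exact hc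
        rw [if_neg (by rintro ⟨-, h⟩; exact hfalse h),
            if_neg (by rintro ⟨-, h⟩; exact hfalse h)]
      · have hiff : (j < m + 1 ∧ t.getD i ' ' = t.getD j ' ') ↔ (j < m ∧ t.getD i ' ' = t.getD j ' ') := by
          constructor <;> (rintro ⟨h1, h2⟩; exact ⟨by omega, h2⟩)
        rw [if_congr hiff rfl rfl]

theorem table_eq (t : List Char) (n : Nat) :
    pvB_table t n = (List.range (n + 1)).map (rfRow t n) := by
  unfold pvB_table
  suffices h : ∀ m ≤ n, ((List.range m).reverse.foldl
      (fun lcp i => lcp ++ [pvB_row t n i (lcp.getD (lcp.length - 1) [])])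
      ((List.range (n - m + 1)).map (rfRow t n))) = (List.range (n + 1)).map (rfRow t n) by
    have := h n (le_refl n)
    simpa [rfRow] using this
  intro m
  induction m with
  | zero => simp
  | succ m ih =>
    intro hm
    rw [show (List.range (m + 1)).reverse = m :: (List.range m).reverse from by
      rw [List.range_succ]; simp]
    simp only [List.foldl_cons]
    have hlen : ((List.range (n - (m + 1) + 1)).map (rfRow t n)).length = n - (m + 1) + 1 := by simp
    have hlast : ((List.range (n - (m + 1) + 1)).map (rfRow t n)).getD
        (((List.range (n - (m + 1) + 1)).map (rfRow t n)).length - 1) [] = rfRow t n (n - m - 1) := by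
      rw [hlen]
      rw [List.getD_eq_getElem _ _ (by simp)]
      simp only [List.getElem_map, List.getElem_range]
      congr 1
    rw [hlast]
    have hrow : pvB_row t n m (rfRow t n (n - m - 1)) = rfRow t n (n - m) := by
      have : n - m = (n - m - 1) + 1 := by omega
      rw [this]
      show _ = pvB_row t n (n - 1 - (n - m - 1)) (rfRow t n (n - m - 1))
      congr 1
      omega
    rw [hrow]
    have hstep : (List.range (n - (m + 1) + 1)).map (rfRow t n) ++ [rfRow t n (n - m)] =
        (List.range (n - m + 1)).map (rfRow t n) := by
      have e2 : n - (m + 1) + 1 = n - m := by omega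
      rw [e2, List.range_succ, List.map_append, List.map_singleton]
    rw [hstep]
    exact ih (by omega)

theorem row_entry (t : List Char) (n : Nat) (hn : n = t.length) :
    ∀ d ≤ n, ∀ j ≤ n, (rfRow t n d).getD j 0 = clcp t (n - d) j := by
  intro d
  induction d with
  | zero =>
    intro _ j hj
    rw [clcp]
    rw [dif_neg (by omega)]
    simp [rfRow, List.getD_eq_getElem?_getD]
  | succ d ih =>
    intro hd j hj
    show (pvB_row t n (n - 1 - d) (rfRow t n d)).getD j 0 = _
    rw [row_spec t n (n - 1 - d) (rfRow t n d) j hj]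
    rw [clcp]
    rcases Nat.lt_or_ge j n with hjn | hjn
    · by_cases hc : t.getD (n - 1 - d) ' ' = t.getD j ' '
      · rw [if_pos ⟨hjn, hc⟩, dif_pos (by refine ⟨by omega, by omega, ?_⟩; convert hc using 2; omega)]
        rw [ih (by omega) (j + 1) (by omega)]
        congr 2
        omega
      · rw [if_neg (by rintro ⟨-, h⟩; exact hc h), dif_neg]
        rintro ⟨-, -, h⟩
        exact hc (by convert h using 2; omega)
    · rw [if_neg (by omega), dif_neg (by omega)]

def pvR (a : Int × List Char) (b : Int × Nat × List Char) : Prop :=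
  b.1 = a.1 ∧ b.2.1 = a.2.length ∧ b.2.2 = a.2

theorem pair_R (t : List Char) (i j : Nat) (hij : i < j) (hjn : j ≤ t.length)
    (ri : List Nat) (hri : ri.getD j 0 = clcp t i j)
    (a : Int × List Char) (b : Int × Nat × List Char) (hR : pvR a b) :
    pvR (pvA_inner t i a j) (pvB_inner t ri i b j) := by
  obtain ⟨h1, h2, h3⟩ := hR
  have hcnt := countLoop_eq t i j hij hjn
  have hlen : (PySem.List.slice t (some (i : Int)) (some (j : Int))).length = j - i := by
    rw [PySem.List.slice_natCast]; simp; omega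
  unfold pvA_inner pvB_inner
  simp only [hcnt, hri, hlen, h1, h2]
  split_ifs with h
  · exact ⟨rfl, hlen.symm, rfl⟩
  · exact ⟨h1, h2, h3⟩

theorem inner_fold (t : List Char) (i : Nat) (ri : List Nat)
    (hri : ∀ j, i < j → j ≤ t.length → ri.getD j 0 = clcp t i j) :
    ∀ js : List Nat, (∀ j ∈ js, i < j ∧ j ≤ t.length) → ∀ a b, pvR a b →
      pvR (js.foldl (pvA_inner t i) a) (js.foldl (pvB_inner t ri i) b) := by
  intro js
  induction js with
  | nil => intro _ a b hR; exact hR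
  | cons j js ih =>
    intro hmem a b hR
    simp only [List.foldl_cons]
    have hj := hmem j (by simp)
    exact ih (fun x hx => hmem x (by simp [hx])) _ _
      (pair_R t i j hj.1 hj.2 ri (hri j hj.1 hj.2) a b hR)

theorem fold_R (t : List Char) :
    pvR ((List.range t.length).foldl
          (fun acc i => (List.range' (i + 1) (t.length - i)).foldl (pvA_inner t i) acc) (0, []))
        ((List.range t.length).foldl
          (fun acc i => (List.range' (i + 1) (t.length - i)).foldl
            (pvB_inner t ((pvB_table t t.length).getD (t.length - i) []) i) acc) (0, 0, [])) := by
  have main : ∀ is : List Nat, (∀ i ∈ is, i < t.length) → ∀ a b, pvR a b →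
      pvR (is.foldl (fun acc i => (List.range' (i + 1) (t.length - i)).foldl (pvA_inner t i) acc) a)
          (is.foldl (fun acc i => (List.range' (i + 1) (t.length - i)).foldl
            (pvB_inner t ((pvB_table t t.length).getD (t.length - i) []) i) acc) b) := by
    intro is
    induction is with
    | nil => intro _ a b hR; exact hR
    | cons i is ih =>
      intro hmem a b hR
      simp only [List.foldl_cons]
      have hi := hmem i (by simp)
      refine ih (fun x hx => hmem x (by simp [hx])) _ _ ?_
      have hri : ∀ j, i < j → j ≤ t.length →
          ((pvB_table t t.length).getD (t.length - i) []).getD j 0 = clcp t i j := by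
        intro j h1 h2
        have htab : (pvB_table t t.length).getD (t.length - i) []
            = rfRow t t.length (t.length - i) := by
          rw [table_eq, List.getD_eq_getElem _ _ (by simp)]
          simp only [List.getElem_map, List.getElem_range]
        rw [htab, row_entry t t.length rfl (t.length - i) (by omega) j h2]
        congr 1
        omega
      exact inner_fold t i _ hri (List.range' (i + 1) (t.length - i))
        (fun j hj => by
          rw [List.mem_range'] at hj
          constructor <;> omega) a b hR
  exact main (List.range t.length) (fun i hi => List.mem_range.mp hi) _ _ ⟨rfl, rfl, rfl⟩

-- ===== VERDICT (by name: the statement is the Claim_ definition above) =====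
theorem find_most_repeated_substring_spec : Claim_equal_find_most_repeated_substring := by
  intro text _
  unfold Spec_find_most_repeated_substring find_most_repeated_substring find_most_repeated_substring_alt
  have h := fold_R text.toList
  obtain ⟨h1, h2, h3⟩ := h
  simp only [h1, h3]
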